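-- pv_equiv track=rewrite | github.com/season-lab/symnav | analyses/tree_pruner.py | check_blacklisted_blocks
-- ===== SOURCE A (Python) =====
-- def check_blacklisted_blocks(path, blocks_black):
--     """ check whether all black-list blocks do not exceed max count """
--     tmp_blocks_black = dict(blocks_black)
--     for b in path:
--         if b in tmp_blocks_black:
--             tmp_blocks_black[b] -= 1
--             if tmp_blocks_black[b] < 0:
--                 return False
--     return True
-- ===== SOURCE B (Python) =====
-- def check_blacklisted_blocks(path, blocks_black):
--     """ check whether all black-list blocks do not exceed max count """
--     limits = dict(blocks_black)
--     counts = {}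
--     for b in path:
--         counts[b] = counts.get(b, 0) + 1
--     for b, c in counts.items():
--         if b in limits and c > limits[b]:
--             return False
--     return True
-- ===== Notes on version B (the rewrite author's own statement) =====
-- stated objective: alternative
-- what changed: Replaces A's single decrementing pass over path (mutating a copy of blocks_black and bailing out mid-path) with a count-then-scan: build a frequency table of path once, then check each distinct block's total count against its limit.
import Mathlib
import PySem

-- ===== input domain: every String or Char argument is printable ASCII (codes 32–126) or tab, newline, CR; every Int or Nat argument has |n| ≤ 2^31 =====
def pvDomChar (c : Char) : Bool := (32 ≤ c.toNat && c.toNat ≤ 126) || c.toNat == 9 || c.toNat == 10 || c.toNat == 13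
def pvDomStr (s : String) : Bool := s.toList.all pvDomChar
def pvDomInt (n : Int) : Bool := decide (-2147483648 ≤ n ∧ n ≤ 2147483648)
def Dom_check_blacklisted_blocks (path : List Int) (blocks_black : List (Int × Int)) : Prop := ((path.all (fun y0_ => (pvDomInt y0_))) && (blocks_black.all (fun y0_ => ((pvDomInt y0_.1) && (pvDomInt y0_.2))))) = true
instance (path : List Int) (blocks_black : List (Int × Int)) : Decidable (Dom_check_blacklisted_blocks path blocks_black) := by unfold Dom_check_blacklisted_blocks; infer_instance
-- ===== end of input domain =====

-- B replaces A's single decrementing pass (mutating a copy of blocks_black, bailing out mid-path)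
-- with count-then-scan: build a frequency table of path once, then check each distinct block's
-- total count against its limit (objective: alternative decomposition, same cost).

-- ===== PORT A =====
-- the 'for b in path' loop with its early 'return False'
def aLoop (tmp : PySem.Dict Int Int) (path : List Int) : Bool :=
  match path with
  | [] => true
  | b :: rest =>
    match tmp.get? b with
    | none => aLoop tmp rest
    | some v =>
      -- tmp_blocks_black[b] -= 1; if tmp_blocks_black[b] < 0: return False
      if v - 1 < 0 then false else aLoop (tmp.insert b (v - 1)) rest

def check_blacklisted_blocks (path : List Int) (blocks_black : List (Int × Int)) : Bool :=
  aLoop (PySem.Dict.ofList blocks_black) path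

-- ===== PORT B =====
-- the 'for b, c in counts.items()' loop with its early 'return False'
def bLoop (limits : PySem.Dict Int Int) (items : List (Int × Int)) : Bool :=
  match items with
  | [] => true
  | (b, c) :: rest =>
    match limits.get? b with
    | some v => if c > v then false else bLoop limits rest
    | none => bLoop limits rest

def check_blacklisted_blocks_alt (path : List Int) (blocks_black : List (Int × Int)) : Bool :=
  let limits := PySem.Dict.ofList blocks_black
  let counts := path.foldl (fun d b => d.insert b (d.getD b 0 + 1)) PySem.Dict.empty
  bLoop limits counts.items

-- ===== PRECONDITION & SPEC =====
def Spec_check_blacklisted_blocks (path : List Int) (blocks_black : List (Int × Int)) (out : Bool) : Prop := out = check_blacklisted_blocks_alt path blocks_black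
instance (path : List Int) (blocks_black : List (Int × Int)) (out : Bool) : Decidable (Spec_check_blacklisted_blocks path blocks_black out) := by unfold Spec_check_blacklisted_blocks; infer_instance

-- ===== CLAIM (what is proved, stated in full; the proofs are below) =====
def Claim_equal_check_blacklisted_blocks : Prop := ∀ (path : List Int) (blocks_black : List (Int × Int)), Dom_check_blacklisted_blocks path blocks_black → Spec_check_blacklisted_blocks path blocks_black (check_blacklisted_blocks path blocks_black)

-- ===== LEMMAS AND PROOFS =====

-- A's loop returns true iff every block of path that has a limit is used at most its limit many times.
theorem aLoop_true_iff (path : List Int) (tmp : PySem.Dict Int Int) :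
    aLoop tmp path = true ↔
      ∀ k, k ∈ path → ∀ v, tmp.get? k = some v → (path.count k : Int) ≤ v := by
  induction path generalizing tmp with
  | nil => simp [aLoop]
  | cons b rest ih =>
    simp only [aLoop]
    cases hget : tmp.get? b with
    | none =>
      rw [ih]
      constructor
      · intro h k hk v hv
        rcases List.mem_cons.mp hk with rfl | hk
        · simp [hget] at hv
        · have := h k hk v hv
          have hne : k ≠ b := fun he => by subst he; simp [hget] at hv
          rw [List.count_cons_of_ne (Ne.symm hne)]
          exact this
      · intro h k hk v hv
        have hne : k ≠ b := fun he => by subst he; simp [hget] at hv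
        have := h k (List.mem_cons_of_mem _ hk) v hv
        rwa [List.count_cons_of_ne (Ne.symm hne)] at this
    | some v =>
      by_cases hv : v - 1 < 0
      · simp only [if_pos hv]
        constructor
        · intro h; exact absurd h (by simp)
        · intro h
          have := h b (List.mem_cons_self) v hget
          have hc : (1 : Int) ≤ ((b :: rest).count b : Int) := by
            have : 1 ≤ (b :: rest).count b := by
              simp [List.count_cons_self]
            exact_mod_cast this
          omega
      · simp only [if_neg hv]
        rw [ih]
        constructor
        · intro h k hk v' hv'
          rcases eq_or_ne k b with rfl | hne
          · rw [hget] at hv'; injection hv' with hvv; subst hvv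
            by_cases hkr : k ∈ rest
            · have := h k hkr (v - 1) (by rw [PySem.Dict.get?_insert_self])
              rw [List.count_cons_self]
              push_cast
              omega
            · rw [List.count_cons_self, List.count_eq_zero_of_not_mem hkr]
              push_cast
              omega
          · have := h k (by rcases List.mem_cons.mp hk with rfl | hk; exact absurd rfl hne; exact hk)
               v' (by rwa [PySem.Dict.get?_insert_of_ne _ _ hne])
            rwa [List.count_cons_of_ne (Ne.symm hne)]
        · intro h k hk v' hv'
          rcases eq_or_ne k b with rfl | hne
          · rw [PySem.Dict.get?_insert_self] at hv'
            injection hv' with hvv; subst hvv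
            have := h k (List.mem_cons_self) v hget
            rw [List.count_cons_self] at this
            push_cast at this ⊢
            omega
          · rw [PySem.Dict.get?_insert_of_ne _ _ hne] at hv'
            have := h k (List.mem_cons_of_mem _ hk) v' hv'
            rwa [List.count_cons_of_ne (Ne.symm hne)] at this

-- B's loop returns true iff no listed pair exceeds its limit.
theorem bLoop_true_iff (limits : PySem.Dict Int Int) (items : List (Int × Int)) :
    bLoop limits items = true ↔
      ∀ p ∈ items, ∀ v, limits.get? p.1 = some v → p.2 ≤ v := by
  induction items with
  | nil => simp [bLoop]
  | cons p rest ih =>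
    obtain ⟨b, c⟩ := p
    simp only [bLoop]
    cases hget : limits.get? b with
    | none =>
      rw [ih]
      constructor
      · intro h q hq v hv
        rcases List.mem_cons.mp hq with rfl | hq
        · simp [hget] at hv
        · exact h q hq v hv
      · intro h q hq v hv; exact h q (List.mem_cons_of_mem _ hq) v hv
    | some v =>
      by_cases hc : c > v
      · simp only [if_pos hc]
        constructor
        · intro h; exact absurd h (by simp)
        · intro h
          have := h (b, c) (List.mem_cons_self) v hget
          simp at this; omega
      · simp only [if_neg hc]
        rw [ih]
        constructor
        · intro h q hq v' hv'
          rcases List.mem_cons.mp hq with rfl | hq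
          · simp only at hv'; rw [hget] at hv'
            injection hv' with hvv; subst hvv
            simpa using le_of_not_gt hc
          · exact h q hq v' hv'
        · intro h q hq v' hv'; exact h q (List.mem_cons_of_mem _ hq) v' hv'

-- ===== VERDICT (by name: the statement is the Claim_ definition above) =====
theorem check_blacklisted_blocks_spec : Claim_equal_check_blacklisted_blocks := by
  intro path blocks_black _
  show check_blacklisted_blocks path blocks_black = check_blacklisted_blocks_alt path blocks_black
  unfold check_blacklisted_blocks check_blacklisted_blocks_alt
  rw [PySem.Dict.foldl_insert_getD_add_one_eq_counter]
  rw [Bool.eq_iff_iff, aLoop_true_iff, bLoop_true_iff]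
  rw [PySem.Dict.items_counter]
  constructor
  · intro h p hp v hv
    obtain ⟨k, hk, rfl⟩ := List.mem_map.mp hp
    exact h k ((PySem.Set.mem_ofList _ _).mp hk) v hv
  · intro h k hk v hv
    exact h (k, (path.count k : Int)) (List.mem_map.mpr ⟨k, (PySem.Set.mem_ofList _ _).mpr hk, rfl⟩) v hv
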